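-- pv_equiv track=rewrite | github.com/jayadeepikareddy-9/TCS---NQT---CODING | ARRAYS/prior_element_count.py | priorElement
-- ===== SOURCE A (Python) =====
-- def priorElement(arr):
--     res = []
--     for i in range(len(arr)):
--         count = 0
--         for j in range(i):
--             if arr[j] < arr[i]:
--                 count += 1
--         res.append(count)
--     return res
-- ===== SOURCE B (Python) =====
-- def priorElement(arr):
--     # Maintain the already-seen elements in a sorted list; for each new element,
--     # binary-search (bisect_left, written by hand) for its insertion point: that
--     # position is exactly the number of prior smaller elements. Then insert it.
--     res = []
--     s = []
--     for x in arr: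
--         lo, hi = 0, len(s)
--         while lo < hi:
--             mid = (lo + hi) // 2
--             if s[mid] < x:
--                 lo = mid + 1
--             else:
--                 hi = mid
--         res.append(lo)
--         s.insert(lo, x)
--     return res
-- ===== Notes on version B (the rewrite author's own statement) =====
-- stated objective: faster
-- what changed: Replaces the nested index loops (for each i, rescan the whole prefix) by a single pass that maintains the seen elements in a sorted list and hand-written bisect_left binary search: the insertion point is the count of prior smaller elements.
import Mathlib
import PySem

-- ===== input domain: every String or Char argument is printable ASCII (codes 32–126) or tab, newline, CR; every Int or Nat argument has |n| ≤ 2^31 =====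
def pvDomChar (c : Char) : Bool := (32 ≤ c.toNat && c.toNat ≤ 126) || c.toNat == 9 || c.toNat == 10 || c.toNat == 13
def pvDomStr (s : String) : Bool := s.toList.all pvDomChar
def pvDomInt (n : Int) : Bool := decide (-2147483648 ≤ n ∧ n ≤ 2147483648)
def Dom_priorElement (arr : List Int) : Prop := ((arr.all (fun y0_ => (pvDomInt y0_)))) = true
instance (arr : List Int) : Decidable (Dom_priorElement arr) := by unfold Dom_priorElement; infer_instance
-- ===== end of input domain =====

-- B replaces A's nested prefix rescans by one pass over a sorted list with a
-- hand-written bisect_left binary search (objective: faster).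

-- ===== PORT A =====
def priorElement (arr : List Int) : List Int :=
  (PySem.List.pyRange 0 (arr.length : Int) 1).foldl (fun res i =>
    res ++ [(PySem.List.pyRange 0 i 1).foldl (fun count j =>
      if PySem.List.pyGetD arr j 0 < PySem.List.pyGetD arr i 0 then count + 1 else count) 0]) []

-- ===== PORT B =====
-- hand-written bisect_left from Source B (lo, hi stay nonnegative in Python; ported as Nat)
def bisectLoop (s : List Int) (x : Int) (lo hi : Nat) : Nat :=
  if _h : lo < hi then
    let mid := (lo + hi) / 2
    if s.getD mid 0 < x then bisectLoop s x (mid + 1) hi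
    else bisectLoop s x lo mid
  else lo
termination_by hi - lo
decreasing_by all_goals omega

def priorElement_alt (arr : List Int) : List Int :=
  (arr.foldl (fun (st : List Int × List Int) x =>
    let lo := bisectLoop st.2 x 0 st.2.length
    (st.1 ++ [(lo : Int)], st.2.take lo ++ x :: st.2.drop lo)) ([], [])).1

-- ===== PRECONDITION & SPEC =====
def Spec_priorElement (arr : List Int) (out : List Int) : Prop := out = priorElement_alt arr
instance (arr : List Int) (out : List Int) : Decidable (Spec_priorElement arr out) := by unfold Spec_priorElement; infer_instance

-- ===== CLAIM (what is proved, stated in full; the proofs are below) =====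
def Claim_equal_priorElement : Prop := ∀ (arr : List Int), Dom_priorElement arr → Spec_priorElement arr (priorElement arr)

-- ===== LEMMAS AND PROOFS =====

-- number of elements of l smaller than x
def specCnt (x : Int) (l : List Int) : Nat := l.countP (fun y => decide (y < x))

-- reference answer: counts of prior-smaller, prefix accumulated in p
def specList : List Int → List Int → List Int
  | _, [] => []
  | p, x :: l => ((specCnt x p : Int)) :: specList (p ++ [x]) l

theorem specCnt_le (x : Int) (l : List Int) : specCnt x l ≤ l.length :=
  List.countP_le_length

theorem specCnt_append (x : Int) (l₁ l₂ : List Int) :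
    specCnt x (l₁ ++ l₂) = specCnt x l₁ + specCnt x l₂ := by
  simp [specCnt, List.countP_append]

theorem specCnt_perm {s p : List Int} (h : s.Perm p) (x : Int) :
    specCnt x s = specCnt x p := h.countP_eq _

-- in a sorted list the elements < x form a prefix of length specCnt
theorem sorted_getD_lt_iff (x : Int) :
    ∀ (s : List Int), s.Pairwise (· ≤ ·) → ∀ (mid : Nat), mid < s.length →
      (s.getD mid 0 < x ↔ mid < specCnt x s) := by
  intro s
  induction s with
  | nil => intro _ mid h; simp at h
  | cons h t ih =>
    intro hs mid hmid
    rw [List.pairwise_cons] at hs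
    obtain ⟨hht, hts⟩ := hs
    have hcnt : specCnt x (h :: t) = (if h < x then 1 else 0) + specCnt x t := by
      simp [specCnt, List.countP_cons]
      split_ifs <;> simp_all
      ring
    have hzero : ¬ h < x → specCnt x t = 0 := by
      intro hx
      simp only [specCnt, List.countP_eq_zero]
      intro y hy
      simp only [decide_eq_true_eq]
      exact fun hlt => hx (lt_of_le_of_lt (hht y hy) hlt)
    cases mid with
    | zero =>
      simp only [List.getD_cons_zero]
      rw [hcnt]
      constructor
      · intro hx; simp [hx]
      · intro hx
        by_contra hnx
        rw [if_neg hnx, hzero hnx] at hx; omega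
    | succ m =>
      simp only [List.getD_cons_succ]
      have hm : m < t.length := by simpa using hmid
      rw [hcnt]
      by_cases hx : h < x
      · rw [if_pos hx]
        rw [ih hts m hm]; omega
      · rw [if_neg hx, hzero hx]
        constructor
        · intro hlt
          exfalso
          have hmem : t.getD m 0 ∈ t := by
            rw [List.getD_eq_getElem _ _ hm]; exact List.getElem_mem hm
          exact hx (lt_of_le_of_lt (hht _ hmem) hlt)
        · omega

theorem bisectLoop_eq (s : List Int) (x : Int) (hs : s.Pairwise (· ≤ ·)) :
    ∀ (lo hi : Nat), hi ≤ s.length → lo ≤ specCnt x s → specCnt x s ≤ hi →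
      bisectLoop s x lo hi = specCnt x s := by
  intro lo hi
  induction lo, hi using bisectLoop.induct s x with
  | case1 lo hi hlt mid hget ih =>
    intro hhi hlo hc
    rw [bisectLoop, dif_pos hlt, if_pos (by exact hget)]
    have hmidlt : mid < s.length := by omega
    have := (sorted_getD_lt_iff x s hs mid hmidlt).1 hget
    exact ih hhi (by omega) hc
  | case2 lo hi hlt mid hget ih =>
    intro hhi hlo hc
    rw [bisectLoop, dif_pos hlt, if_neg (by exact hget)]
    have hmidlt : mid < s.length := by omega
    have := mt (sorted_getD_lt_iff x s hs mid hmidlt).2 hget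
    exact ih (by omega) hlo (by omega)
  | case3 lo hi hge =>
    intro hhi hlo hc
    rw [bisectLoop, dif_neg hge]
    omega

theorem insert_perm (s : List Int) (x : Int) (n : Nat) :
    (s.take n ++ x :: s.drop n).Perm (x :: s) := by
  calc (s.take n ++ x :: s.drop n).Perm (x :: (s.take n ++ s.drop n)) := List.perm_middle
    _ = x :: s := by rw [List.take_append_drop]

theorem insert_sorted (s : List Int) (x : Int) (hs : s.Pairwise (· ≤ ·)) :
    (s.take (specCnt x s) ++ x :: s.drop (specCnt x s)).Pairwise (· ≤ ·) := by
  induction s with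
  | nil => simp [specCnt]
  | cons h t ih =>
    rw [List.pairwise_cons] at hs
    obtain ⟨hht, hts⟩ := hs
    by_cases hx : h < x
    · have hcnt : specCnt x (h :: t) = specCnt x t + 1 := by
        simp [specCnt, hx]
      rw [hcnt]
      simp only [List.take_succ_cons, List.drop_succ_cons, List.cons_append]
      rw [List.pairwise_cons]
      refine ⟨?_, ih hts⟩
      intro b hb
      rcases List.mem_append.1 hb with hb | hb
      · exact hht b (List.take_subset _ _ hb)
      · rcases List.mem_cons.1 hb with rfl | hb
        · exact le_of_lt hx
        · exact hht b (List.drop_subset _ _ hb)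
    · have hzero : specCnt x (h :: t) = 0 := by
        simp only [specCnt, List.countP_eq_zero]
        intro y hy
        simp only [decide_eq_true_eq]
        rcases List.mem_cons.1 hy with rfl | hy
        · exact fun h' => hx h'
        · exact fun hlt => hx (lt_of_le_of_lt (hht y hy) hlt)
      rw [hzero]
      simp only [List.take_zero, List.drop_zero, List.nil_append]
      rw [List.pairwise_cons]
      refine ⟨?_, List.pairwise_cons.2 ⟨hht, hts⟩⟩
      intro b hb
      have hxh : x ≤ h := le_of_not_gt hx
      rcases List.mem_cons.1 hb with rfl | hb
      · exact hxh
      · exact le_trans hxh (hht b hb)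

-- B's fold computes specList
theorem alt_fold_eq : ∀ (l res s p : List Int), s.Perm p → s.Pairwise (· ≤ ·) →
    (l.foldl (fun (st : List Int × List Int) x =>
      let lo := bisectLoop st.2 x 0 st.2.length
      (st.1 ++ [(lo : Int)], st.2.take lo ++ x :: st.2.drop lo)) (res, s)).1
    = res ++ specList p l := by
  intro l
  induction l with
  | nil => intro res s p _ _; simp [specList]
  | cons x l ih =>
    intro res s p hperm hsorted
    simp only [List.foldl_cons]
    have hlo : bisectLoop s x 0 s.length = specCnt x s :=
      bisectLoop_eq s x hsorted 0 s.length le_rfl (Nat.zero_le _) (specCnt_le x s)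
    have hperm' : (s.take (specCnt x s) ++ x :: s.drop (specCnt x s)).Perm (p ++ [x]) := by
      refine (insert_perm s x _).trans ?_
      refine List.Perm.trans (List.Perm.cons x hperm) ?_
      simpa using (List.perm_middle (l₁ := p) (l₂ := ([] : List Int)) (a := x)).symm
    have := ih (res ++ [((specCnt x s : Nat) : Int)])
      (s.take (specCnt x s) ++ x :: s.drop (specCnt x s)) (p ++ [x])
      hperm' (insert_sorted s x hsorted)
    simp only [hlo]
    rw [this, specList]
    rw [specCnt_perm hperm x]
    simp

theorem alt_eq_specList (arr : List Int) : priorElement_alt arr = specList [] arr := by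
  unfold priorElement_alt
  simpa using alt_fold_eq arr [] [] [] (List.Perm.refl _) (List.Pairwise.nil)

-- A's inner loop counts the smaller elements of the prefix
theorem inner_eq (arr : List Int) (v : Int) :
    ∀ (k : Nat), k ≤ arr.length →
      (PySem.List.pyRange 0 (k : Int) 1).foldl (fun count j =>
        if PySem.List.pyGetD arr j 0 < v then count + 1 else count) 0
      = ((specCnt v (arr.take k) : Nat) : Int) := by
  intro k
  induction k with
  | zero => intro _; simp [specCnt]
  | succ m ih =>
    intro hk
    have hm : m < arr.length := by omega
    have hsplit : PySem.List.pyRange 0 ((m + 1 : Nat) : Int) 1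
        = PySem.List.pyRange 0 (m : Int) 1 ++ [(m : Int)] := by
      push_cast
      exact PySem.List.pyRange_one_succ_right (by positivity)
    rw [hsplit, List.foldl_append, ih (by omega)]
    have htake : arr.take (m + 1) = arr.take m ++ [arr.getD m 0] := by
      rw [List.getD_eq_getElem _ _ hm]
      exact List.take_succ_eq_append_getElem hm
    rw [htake, specCnt_append]
    simp only [List.foldl_cons, List.foldl_nil, PySem.List.pyGetD_natCast, List.getD]
    by_cases hlt : arr[m]?.getD 0 < v
    · simp [hlt, specCnt]
    · simp [hlt, specCnt]

-- A's outer loop computes specList of the remaining suffix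
theorem outer_eq (arr : List Int) :
    ∀ (d k : Nat), k + d = arr.length → ∀ (res : List Int),
      (PySem.List.pyRange (k : Int) (arr.length : Int) 1).foldl (fun res i =>
        res ++ [(PySem.List.pyRange 0 i 1).foldl (fun count j =>
          if PySem.List.pyGetD arr j 0 < PySem.List.pyGetD arr i 0 then count + 1 else count) 0]) res
      = res ++ specList (arr.take k) (arr.drop k) := by
  intro d
  induction d with
  | zero =>
    intro k hk res
    rw [PySem.List.pyRange_one_eq_nil (by omega)]
    have hd : arr.drop k = [] := List.drop_of_length_le (by omega)
    simp [hd, specList]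
  | succ m ih =>
    intro k hk res
    have hklt : k < arr.length := by omega
    rw [PySem.List.pyRange_one_cons (by exact_mod_cast hklt)]
    simp only [List.foldl_cons]
    have hstep : ((k : Int) + 1) = ((k + 1 : Nat) : Int) := by push_cast; ring
    rw [hstep, ih (k + 1) (by omega)]
    have hdrop : arr.drop k = arr.getD k 0 :: arr.drop (k + 1) := by
      rw [List.getD_eq_getElem _ _ hklt]
      exact (List.drop_eq_getElem_cons hklt)
    have htake : arr.take (k + 1) = arr.take k ++ [arr.getD k 0] := by
      rw [List.getD_eq_getElem _ _ hklt]
      exact List.take_succ_eq_append_getElem hklt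
    rw [hdrop, specList, ← htake]
    rw [inner_eq arr (PySem.List.pyGetD arr (k : Int) 0) k (le_of_lt hklt)]
    simp [PySem.List.pyGetD_natCast]

theorem a_eq_specList (arr : List Int) : priorElement arr = specList [] arr := by
  unfold priorElement
  have := outer_eq arr arr.length 0 (by omega) []
  simpa using this

-- ===== VERDICT (by name: the statement is the Claim_ definition above) =====
theorem priorElement_spec : Claim_equal_priorElement := by
  intro arr _
  unfold Spec_priorElement
  rw [a_eq_specList, alt_eq_specList]
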